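-- pv_equiv track=rewrite | github.com/pypi-data/pypi-mirror-84 | packages/AutoChatbot/AutoChatbot-0.1.1-py3-none-any.whl/autochatbot/clean.py | sort_line_pad
-- ===== SOURCE A (Python) =====
-- def sort_line_pad(q, a, max_line_length):
--     """
--     sorts questions and answers based on their length, returns sorted list of question or answer
--
--     :type q: list
--     :param q: list of questions
--
--     :type a: list
--     :param a: list of answers
--
--     :type max_line_length: int
--     :param max_line_length: maximum length of question or answer
--     """
--
--     sortq, sorta = [], []
--     for length in range(1, max_line_length+1):
--         for i in enumerate(q):
--             if len(i[1]) == length: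
--                 sortq.append(q[i[0]])
--                 sorta.append(a[i[0]])
--     return sortq, sorta
-- ===== SOURCE B (Python) =====
-- def sort_line_pad(q, a, max_line_length):
--     """One pass: bucket (question, answer) pairs by question length, then
--     concatenate the buckets for lengths 1..max_line_length and unzip."""
--     buckets = {}
--     for pair in zip(q, a):
--         buckets.setdefault(len(pair[0]), []).append(pair)
--     out = []
--     for length in range(1, max_line_length + 1):
--         out += buckets.get(length, [])
--     return [p[0] for p in out], [p[1] for p in out]
-- ===== Notes on version B (the rewrite author's own statement) =====
-- stated objective: faster
-- what changed: Instead of rescanning all of q once per length 1..max_line_length, B makes one pass over zip(q,a) bucketing (question,answer) pairs by question length, concatenates the buckets in increasing length order and unzips.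
import Mathlib
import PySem

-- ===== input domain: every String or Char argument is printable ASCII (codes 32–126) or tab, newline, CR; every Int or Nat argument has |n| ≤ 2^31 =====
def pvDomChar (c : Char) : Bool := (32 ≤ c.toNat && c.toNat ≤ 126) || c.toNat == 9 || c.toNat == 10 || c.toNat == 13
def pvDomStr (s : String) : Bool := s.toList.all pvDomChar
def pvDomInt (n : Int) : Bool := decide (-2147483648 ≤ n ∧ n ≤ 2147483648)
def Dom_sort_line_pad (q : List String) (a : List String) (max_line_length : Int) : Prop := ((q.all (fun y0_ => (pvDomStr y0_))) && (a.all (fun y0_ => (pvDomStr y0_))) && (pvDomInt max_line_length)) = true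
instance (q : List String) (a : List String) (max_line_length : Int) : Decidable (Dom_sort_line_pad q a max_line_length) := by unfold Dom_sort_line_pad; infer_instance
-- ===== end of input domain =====

-- B replaces A's rescan of q for every length 1..max_line_length by one bucketing
-- pass over zip(q, a) keyed by question length, then bucket concatenation + unzip (asymptotically faster).

-- ===== PORT A =====
def sort_line_pad (q : List String) (a : List String) (max_line_length : Int) : List String × List String :=
  (PySem.List.pyRange 1 (max_line_length + 1) 1).foldl
    (fun (st : List String × List String) length =>
      (PySem.List.enumerate q 0).foldl
        (fun (st : List String × List String) i =>
          if PySem.Str.len i.2 = length then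
            (st.1 ++ [PySem.List.pyGetD q i.1 ""], st.2 ++ [PySem.List.pyGetD a i.1 ""])
          else st) st)
    ([], [])

-- ===== PORT B =====
def sort_line_pad_alt (q : List String) (a : List String) (max_line_length : Int) : List String × List String :=
  let buckets : PySem.Dict Int (List (String × String)) :=
    (q.zip a).foldl (fun d pair => d.modify (PySem.Str.len pair.1) [] (· ++ [pair])) PySem.Dict.empty
  let out : List (String × String) :=
    (PySem.List.pyRange 1 (max_line_length + 1) 1).foldl
      (fun out length => out ++ buckets.getD length []) []
  (out.map (fun p => p.1), out.map (fun p => p.2))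

-- ===== PRECONDITION & SPEC =====
-- Pre_ excludes exactly the inputs on which A raises IndexError: some question whose
-- length lies in 1..max_line_length sits at an index with no corresponding answer.
def Pre_sort_line_pad (q : List String) (a : List String) (max_line_length : Int) : Prop :=
  ∀ k, k < q.length → (∀ h : k < q.length, 1 ≤ (q[k]'h).length ∧ ((q[k]'h).length : Int) ≤ max_line_length) → k < a.length
instance (q : List String) (a : List String) (max_line_length : Int) : Decidable (Pre_sort_line_pad q a max_line_length) := by unfold Pre_sort_line_pad; infer_instance
def pvWitness_sort_line_pad : List String × List String × Int := (["ab", "c"], ["x", "y"], 5)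
def Spec_sort_line_pad (q : List String) (a : List String) (max_line_length : Int) (out : List String × List String) : Prop := out = sort_line_pad_alt q a max_line_length
instance (q : List String) (a : List String) (max_line_length : Int) (out : List String × List String) : Decidable (Spec_sort_line_pad q a max_line_length out) := by unfold Spec_sort_line_pad; infer_instance

-- ===== CLAIM (what is proved, stated in full; the proofs are below) =====
def Claim_equal_sort_line_pad : Prop := ∀ (q : List String) (a : List String) (max_line_length : Int), Dom_sort_line_pad q a max_line_length → Pre_sort_line_pad q a max_line_length → Spec_sort_line_pad q a max_line_length (sort_line_pad q a max_line_length)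

-- ===== LEMMAS AND PROOFS =====

-- shifting the start of enumerate
theorem pv_enum_shift {α : Type} (xs : List α) (s : Int) :
    PySem.List.enumerate xs (s + 1) = (PySem.List.enumerate xs s).map (fun p => (p.1 + 1, p.2)) := by
  induction xs generalizing s with
  | nil => simp [PySem.List.enumerate_nil]
  | cons x xs ih => simp [PySem.List.enumerate_cons, ih]

-- cons shifts an index-1 lookup
theorem pv_pyGetD_cons_shift (x : String) (xs : List String) (k : Nat) (d : String) :
    PySem.List.pyGetD (x :: xs) ((k : Int) + 1) d = PySem.List.pyGetD xs (k : Int) d := by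
  have h : ((k : Int) + 1) = ((k + 1 : Nat) : Int) := by push_cast; ring
  rw [h, PySem.List.pyGetD_natCast, PySem.List.pyGetD_natCast]
  simp

-- core: under the no-IndexError hypothesis, the index-filtered double lookup over
-- enumerate q equals the filter of zip q a (for a predicate P on the question).
theorem pv_core (P : String → Bool) :
    ∀ (q a : List String),
      (∀ k (hk : k < q.length), P (q[k]'hk) → k < a.length) →
      ((PySem.List.enumerate q 0).filter (fun p => P p.2)).map
          (fun p => (PySem.List.pyGetD q p.1 "", PySem.List.pyGetD a p.1 ""))
        = (q.zip a).filter (fun pr => P pr.1) := by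
  intro q
  induction q with
  | nil => intro a _; simp [PySem.List.enumerate_nil]
  | cons x q' ih =>
    intro a hPre
    cases a with
    | nil =>
      have hnone : ∀ p ∈ PySem.List.enumerate (x :: q') 0, ¬ P p.2 = true := by
        intro p hp
        rcases (PySem.List.mem_enumerate_iff _ _ _).mp hp with ⟨k, hk, rfl⟩
        intro hP
        have h2 := hPre k hk (by simpa using hP)
        simp only [List.length_nil] at h2
        omega
      have : (PySem.List.enumerate (x :: q') 0).filter (fun p => P p.2) = [] := by
        apply List.filter_eq_nil_iff.mpr
        intro p hp
        simpa using hnone p hp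
      rw [this]
      simp
    | cons y a' =>
      have hPre' : ∀ k (hk : k < q'.length), P (q'[k]'hk) → k < a'.length := by
        intro k hk hP
        have h2 := hPre (k + 1) (by simpa using Nat.succ_lt_succ hk) (by simpa using hP)
        simp only [List.length_cons] at h2
        omega
      have hz : (0 : Int) + 1 = 1 := by ring
      have hshift : PySem.List.enumerate q' 1 = (PySem.List.enumerate q' 0).map (fun p => (p.1 + 1, p.2)) := by
        simpa [hz] using pv_enum_shift q' 0
      have htail :
          ((PySem.List.enumerate q' 0).filter (fun p => P p.2)).map
              (fun p => (PySem.List.pyGetD (x :: q') (p.1 + 1) "", PySem.List.pyGetD (y :: a') (p.1 + 1) ""))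
            = ((PySem.List.enumerate q' 0).filter (fun p => P p.2)).map
              (fun p => (PySem.List.pyGetD q' p.1 "", PySem.List.pyGetD a' p.1 "")) := by
        apply List.map_congr_left
        intro p hp
        have hpmem : p ∈ PySem.List.enumerate q' 0 := List.mem_of_mem_filter hp
        rcases (PySem.List.mem_enumerate_iff _ _ _).mp hpmem with ⟨k, hk, rfl⟩
        simp [pv_pyGetD_cons_shift]
      by_cases hPx : P x = true
      · simp [PySem.List.enumerate_cons, hshift, List.filter_map, Function.comp_def,
          List.map_map, hPx, PySem.List.pyGetD_zero_cons, htail, ih a' hPre']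
      · simp [PySem.List.enumerate_cons, hshift, List.filter_map, Function.comp_def,
          List.map_map, hPx, htail, ih a' hPre']

-- the bucket dictionary read back: bucket L = the zip pairs whose question has length L
theorem pv_bucket (q a : List String) (L : Int) :
    ((q.zip a).foldl (fun d pair => d.modify (PySem.Str.len pair.1) [] (· ++ [pair]))
        (PySem.Dict.empty : PySem.Dict Int (List (String × String)))).getD L []
      = (q.zip a).filter (fun pr => PySem.Str.len pr.1 == L) := by
  have h : (q.zip a).foldl (fun d pair => d.modify (PySem.Str.len pair.1) [] (· ++ [pair]))
        (PySem.Dict.empty : PySem.Dict Int (List (String × String)))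
      = ((q.zip a).map (fun pr => (PySem.Str.len pr.1, pr))).foldl
          (fun d p => d.modify p.1 [] (· ++ [p.2])) PySem.Dict.empty := by
    rw [List.foldl_map]
  rw [h, PySem.Dict.getD_foldl_modify_append]
  simp [List.filter_map, Function.comp_def, List.map_map]

-- A's inner loop over one length L, rewritten as the two projections of pv_core's list
theorem pv_innerA (q a : List String) (L : Int) (st : List String × List String) :
    (PySem.List.enumerate q 0).foldl
        (fun (st : List String × List String) i =>
          if PySem.Str.len i.2 = L then
            (st.1 ++ [PySem.List.pyGetD q i.1 ""], st.2 ++ [PySem.List.pyGetD a i.1 ""])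
          else st) st
      = (st.1 ++ (((PySem.List.enumerate q 0).filter (fun p => PySem.Str.len p.2 == L)).map
            (fun p => (PySem.List.pyGetD q p.1 "", PySem.List.pyGetD a p.1 ""))).map (fun pr => pr.1),
         st.2 ++ (((PySem.List.enumerate q 0).filter (fun p => PySem.Str.len p.2 == L)).map
            (fun p => (PySem.List.pyGetD q p.1 "", PySem.List.pyGetD a p.1 ""))).map (fun pr => pr.2)) := by
  induction (PySem.List.enumerate q 0) generalizing st with
  | nil => simp
  | cons x xs ih =>
    rw [List.foldl_cons]
    by_cases h : PySem.Str.len x.2 = L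
    · have hb : (PySem.Str.len x.2 == L) = true := by simpa using h
      rw [if_pos h, ih]
      simp only [List.filter_cons, hb, if_true, List.map_cons]
      simp
    · have hb : (PySem.Str.len x.2 == L) = false := by simpa using h
      rw [if_neg h, ih]
      simp only [List.filter_cons, hb]
      simp

-- the two folds agree step by step once each length's contribution is the same bucket
theorem pv_outer (q a : List String) (buck : Int → List (String × String)) (ls : List Int)
    (h : ∀ L ∈ ls,
      ((PySem.List.enumerate q 0).filter (fun p => PySem.Str.len p.2 == L)).map
          (fun p => (PySem.List.pyGetD q p.1 "", PySem.List.pyGetD a p.1 "")) = buck L) :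
    ∀ (out : List (String × String)),
      ls.foldl
        (fun (st : List String × List String) length =>
          (PySem.List.enumerate q 0).foldl
            (fun (st : List String × List String) i =>
              if PySem.Str.len i.2 = length then
                (st.1 ++ [PySem.List.pyGetD q i.1 ""], st.2 ++ [PySem.List.pyGetD a i.1 ""])
              else st) st)
        (out.map (fun p => p.1), out.map (fun p => p.2))
      = ((ls.foldl (fun o L => o ++ buck L) out).map (fun p => p.1),
         (ls.foldl (fun o L => o ++ buck L) out).map (fun p => p.2)) := by
  induction ls with
  | nil => intro out; simp
  | cons L ls ih =>
    intro out
    have hL := h L (List.mem_cons_self ..)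
    have hrest : ∀ L' ∈ ls,
        ((PySem.List.enumerate q 0).filter (fun p => PySem.Str.len p.2 == L')).map
            (fun p => (PySem.List.pyGetD q p.1 "", PySem.List.pyGetD a p.1 "")) = buck L' := by
      intro L' hL'; exact h L' (List.mem_cons_of_mem _ hL')
    calc (L :: ls).foldl _ (out.map (fun p => p.1), out.map (fun p => p.2))
        = ls.foldl
            (fun (st : List String × List String) length =>
              (PySem.List.enumerate q 0).foldl
                (fun (st : List String × List String) i =>
                  if PySem.Str.len i.2 = length then
                    (st.1 ++ [PySem.List.pyGetD q i.1 ""], st.2 ++ [PySem.List.pyGetD a i.1 ""])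
                  else st) st)
            ((out ++ buck L).map (fun p => p.1), (out ++ buck L).map (fun p => p.2)) := by
          rw [List.foldl_cons, pv_innerA, hL]; simp
      _ = _ := by rw [ih hrest (out ++ buck L)]; simp

-- ===== VERDICT (by name: the statement is the Claim_ definition above) =====
theorem sort_line_pad_spec : Claim_equal_sort_line_pad := by
  intro q a m _ hPre
  unfold Spec_sort_line_pad sort_line_pad sort_line_pad_alt
  have hbuck : ∀ L ∈ PySem.List.pyRange 1 (m + 1) 1,
      ((PySem.List.enumerate q 0).filter (fun p => PySem.Str.len p.2 == L)).map
          (fun p => (PySem.List.pyGetD q p.1 "", PySem.List.pyGetD a p.1 ""))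
        = ((q.zip a).foldl (fun d pair => d.modify (PySem.Str.len pair.1) [] (· ++ [pair]))
            (PySem.Dict.empty : PySem.Dict Int (List (String × String)))).getD L [] := by
    intro L hL
    have hLb : 1 ≤ L ∧ L < m + 1 := by
      have := (PySem.List.mem_pyRange_one).mp hL
      omega
    rw [pv_bucket]
    apply pv_core (fun s => PySem.Str.len s == L)
    intro k hk hP
    apply hPre k hk
    intro h
    have : PySem.Str.len (q[k]'h) = L := by simpa using hP
    have hlen : PySem.Str.len (q[k]'h) = ((q[k]'h).length : Int) := by
      simp [PySem.Str.len_eq]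
    constructor
    · have := hLb.1; omega
    · have := hLb.2; omega
  have := pv_outer q a
      (fun L => ((q.zip a).foldl (fun d pair => d.modify (PySem.Str.len pair.1) [] (· ++ [pair]))
          (PySem.Dict.empty : PySem.Dict Int (List (String × String)))).getD L [])
      (PySem.List.pyRange 1 (m + 1) 1) hbuck []
  simpa using this
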